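-- pv_equiv track=rewrite | github.com/igg2166/Isaac-Donoso-Algoritmos | clase abril 20/app.py | busqueda_elemento_repetido_cuadratico
-- ===== SOURCE A (Python) =====
-- def busqueda_elemento_repetido_cuadratico(lista):
--     mayor = 0
--     valor = 0
--     for i in range(len(lista)):
--         contador = 0
--         for j in range(len(lista)):
--             if lista[j] == lista[i]:
--                 contador += 1
--         if contador > valor:
--             valor = contador
--             mayor = i
--     return valor, mayor
-- ===== SOURCE B (Python) =====
-- def busqueda_elemento_repetido_cuadratico(lista):
--     if not lista:
--         return (0, 0)
--     counts = {}
--     for x in lista: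
--         counts[x] = counts.get(x, 0) + 1
--     m = max(counts.values())
--     i = next(i for i, x in enumerate(lista) if counts[x] == m)
--     return (m, i)
-- ===== Notes on version B (the rewrite author's own statement) =====
-- stated objective: faster
-- what changed: Replaces the quadratic nested count-scan with one counting-dict pass, a max over the counts, and a single scan for the first index whose element attains that maximum.
import Mathlib
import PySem

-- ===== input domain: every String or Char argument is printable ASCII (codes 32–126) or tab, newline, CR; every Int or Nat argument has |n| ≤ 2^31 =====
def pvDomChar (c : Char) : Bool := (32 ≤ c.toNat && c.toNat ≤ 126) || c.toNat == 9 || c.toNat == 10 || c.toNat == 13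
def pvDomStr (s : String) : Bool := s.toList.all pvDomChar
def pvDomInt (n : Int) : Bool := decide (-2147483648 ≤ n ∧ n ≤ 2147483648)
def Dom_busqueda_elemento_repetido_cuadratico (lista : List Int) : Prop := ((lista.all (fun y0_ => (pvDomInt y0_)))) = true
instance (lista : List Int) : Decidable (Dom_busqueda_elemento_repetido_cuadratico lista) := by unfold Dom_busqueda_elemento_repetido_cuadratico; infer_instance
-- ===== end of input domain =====

-- B replaces A's quadratic nested count-scan by a counting dict, a max over counts, and one scan for the first maximal index (faster).

-- ===== PORT A =====
def busqueda_elemento_repetido_cuadratico (lista : List Int) : Int × Int :=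
  -- state (mayor, valor), loop over i in range(len(lista)), inner counting loop over j
  let st := (PySem.List.pyRange 0 lista.length 1).foldl
    (fun (st : Int × Int) i =>
      let contador := (PySem.List.pyRange 0 lista.length 1).foldl
        (fun contador j =>
          if PySem.List.pyGetD lista j 0 == PySem.List.pyGetD lista i 0 then contador + 1 else contador) 0
      if contador > st.2 then (i, contador) else st)
    (0, 0)
  (st.2, st.1)

-- ===== PORT B =====
def busqueda_elemento_repetido_cuadratico_alt (lista : List Int) : Int × Int :=
  if lista = [] then (0, 0)
  else
    let counts := lista.foldl (fun d x => d.insert x (d.getD x 0 + 1)) (PySem.Dict.empty : PySem.Dict Int Int)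
    let m := (PySem.List.max? counts.values (fun v => v)).getD 0
    let i := (((PySem.List.enumerate lista 0).find? (fun p => counts.getD p.2 0 == m)).getD (0, 0)).1
    (m, i)

-- ===== PRECONDITION & SPEC =====
def Spec_busqueda_elemento_repetido_cuadratico (lista : List Int) (out : Int × Int) : Prop := out = busqueda_elemento_repetido_cuadratico_alt lista
instance (lista : List Int) (out : Int × Int) : Decidable (Spec_busqueda_elemento_repetido_cuadratico lista out) := by unfold Spec_busqueda_elemento_repetido_cuadratico; infer_instance

-- ===== CLAIM (what is proved, stated in full; the proofs are below) =====
def Claim_equal_busqueda_elemento_repetido_cuadratico : Prop := ∀ (lista : List Int), Dom_busqueda_elemento_repetido_cuadratico lista → Spec_busqueda_elemento_repetido_cuadratico lista (busqueda_elemento_repetido_cuadratico lista)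

-- ===== LEMMAS AND PROOFS =====

-- If every remaining count is ≤ the current best, the fold never updates.
theorem pvFoldNoUpdate (g : Int → Int) (ps : List (Int × Int)) (m0 v0 : Int)
    (h : ∀ p ∈ ps, g p.2 ≤ v0) :
    ps.foldl (fun st p => if g p.2 > st.2 then (p.1, g p.2) else st) (m0, v0) = (m0, v0) := by
  induction ps with
  | nil => rfl
  | cons p ps ih =>
    simp only [List.foldl_cons]
    have hp : ¬ (g p.2 > v0) := not_lt.mpr (h p (by simp))
    rw [if_neg hp]
    exact ih (fun q hq => h q (by simp [hq]))

-- Main fold characterisation: with a strict bound still to be reached, the fold lands on the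
-- first pair whose count equals the maximum M.
theorem pvFoldChar (g : Int → Int) (M : Int) (ps : List (Int × Int)) (m0 v0 : Int)
    (hub : ∀ p ∈ ps, g p.2 ≤ M) (hv : v0 < M) (hex : ∃ p ∈ ps, g p.2 = M) :
    ∃ q, ps.find? (fun p => g p.2 == M) = some q ∧
      ps.foldl (fun st p => if g p.2 > st.2 then (p.1, g p.2) else st) (m0, v0) = (q.1, M) := by
  induction ps generalizing m0 v0 with
  | nil => rcases hex with ⟨p, hp, _⟩; cases hp
  | cons p ps ih =>
    by_cases hpM : g p.2 = M
    · refine ⟨p, ?_, ?_⟩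
      · simp [hpM]
      · simp only [List.foldl_cons, hpM, if_pos hv]
        exact pvFoldNoUpdate g ps p.1 M (fun q hq => hub q (by simp [hq]))
    · have hex' : ∃ q ∈ ps, g q.2 = M := by
        rcases hex with ⟨q, hq, hqM⟩
        rcases List.mem_cons.mp hq with rfl | hq'
        · exact absurd hqM hpM
        · exact ⟨q, hq', hqM⟩
      have hub' : ∀ q ∈ ps, g q.2 ≤ M := fun q hq => hub q (by simp [hq])
      have hplt : g p.2 < M := lt_of_le_of_ne (hub p (by simp)) hpM
      simp only [List.find?_cons, show (fun q : Int × Int => g q.2 == M) p = false by simp [hpM]]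
      simp only [List.foldl_cons]
      by_cases hstep : g p.2 > v0
      · rw [if_pos hstep]; exact ih p.1 (g p.2) hub' hplt hex'
      · rw [if_neg hstep]; exact ih m0 v0 hub' hv hex'

-- The counting-dict lookup is List.count.
theorem pvCountsGetD (lista : List Int) (x : Int) :
    (lista.foldl (fun d y => d.insert y (d.getD y 0 + 1)) (PySem.Dict.empty : PySem.Dict Int Int)).getD x 0
      = (lista.count x : Int) := by
  rw [PySem.Dict.foldl_insert_getD_add_one_eq_counter, PySem.Dict.getD_counter]

-- ===== VERDICT (by name: the statement is the Claim_ definition above) =====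
theorem busqueda_elemento_repetido_cuadratico_spec : Claim_equal_busqueda_elemento_repetido_cuadratico := by
  intro lista _
  unfold Spec_busqueda_elemento_repetido_cuadratico
  unfold busqueda_elemento_repetido_cuadratico busqueda_elemento_repetido_cuadratico_alt
  by_cases hnil : lista = []
  · subst hnil; rfl
  · rw [if_neg hnil]
    dsimp only
    set counts := lista.foldl (fun d x => d.insert x (d.getD x 0 + 1)) (PySem.Dict.empty : PySem.Dict Int Int) with hcounts
    have hcget : ∀ x, counts.getD x 0 = (lista.count x : Int) := pvCountsGetD lista
    have hcounter : counts = PySem.Dict.counter lista := by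
      rw [hcounts, PySem.Dict.foldl_insert_getD_add_one_eq_counter]
    obtain ⟨v, hvmax⟩ : ∃ v, PySem.List.max? counts.values (fun y => y) = some v := by
      rcases Option.eq_none_or_eq_some (PySem.List.max? counts.values (fun y => y)) with h | h
      · exfalso
        have hvals : counts.values = [] := by
          have := h
          rw [show (PySem.List.max? counts.values (fun y => y) = none) ↔ counts.values = [] from PySem.List.max?_eq_none_iff _ _] at this
          exact this
        rw [hcounter, PySem.Dict.values_eq_map_keys _ (PySem.Dict.nodup_keys_counter lista) 0,
            PySem.Dict.keys_counter] at hvals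
        rcases List.exists_mem_of_ne_nil lista hnil with ⟨a, ha⟩
        have hempty : (PySem.Set.ofList lista) = [] := List.map_eq_nil_iff.mp hvals
        have hmem : a ∈ PySem.Set.ofList lista := (PySem.Set.mem_ofList _ _).mpr ha
        rw [hempty] at hmem
        exact absurd hmem (List.not_mem_nil)
      · exact h
    have hm : ((PySem.List.max? counts.values (fun y => y)).getD 0) = v := by rw [hvmax]; rfl
    have hub : ∀ x ∈ lista, (lista.count x : Int) ≤ v := by
      intro x hx
      have hmemv : (lista.count x : Int) ∈ counts.values := by
        rw [hcounter, PySem.Dict.values_eq_map_keys _ (PySem.Dict.nodup_keys_counter lista) 0]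
        refine List.mem_map.mpr ⟨x, ?_, ?_⟩
        · rw [PySem.Dict.keys_counter]; exact (PySem.Set.mem_ofList _ _).mpr hx
        · rw [PySem.Dict.getD_counter]
      exact PySem.List.max?_isMax hvmax _ hmemv
    obtain ⟨k, hk, hkv⟩ : ∃ k ∈ lista, (lista.count k : Int) = v := by
      have hvmem : v ∈ counts.values := PySem.List.max?_mem hvmax
      rw [hcounter, PySem.Dict.values_eq_map_keys _ (PySem.Dict.nodup_keys_counter lista) 0] at hvmem
      rcases List.mem_map.mp hvmem with ⟨k, hkkeys, hkd⟩
      rw [PySem.Dict.keys_counter] at hkkeys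
      exact ⟨k, (PySem.Set.mem_ofList _ _).mp hkkeys, by rw [← hkd, PySem.Dict.getD_counter]⟩
    have hvpos : (0 : Int) < v := by
      have := List.count_pos_iff.mpr hk
      omega
    have hinner : ∀ i : Int,
        (PySem.List.pyRange 0 lista.length 1).foldl
          (fun contador j =>
            if PySem.List.pyGetD lista j 0 == PySem.List.pyGetD lista i 0 then contador + 1 else contador) 0
          = (lista.count (PySem.List.pyGetD lista i 0) : Int) := by
      intro i
      rw [PySem.List.foldl_pyRange_zero_pyGetD' lista 0
            (fun c x => if x == PySem.List.pyGetD lista i 0 then c + 1 else c) 0]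
      rw [PySem.List.foldl_beq_add_one]
      omega
    have henum : PySem.List.enumerate lista 0
        = (PySem.List.pyRange 0 (lista.length : Int) 1).map (fun j => (j, PySem.List.pyGetD lista j 0)) := by
      rw [PySem.List.enumerate_eq_map_pyRange lista 0]
      simp [PySem.List.len_eq]
    have hA : (PySem.List.pyRange 0 lista.length 1).foldl
        (fun (st : Int × Int) i =>
          let contador := (PySem.List.pyRange 0 lista.length 1).foldl
            (fun contador j =>
              if PySem.List.pyGetD lista j 0 == PySem.List.pyGetD lista i 0 then contador + 1 else contador) 0
          if contador > st.2 then (i, contador) else st)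
        (0, 0)
        = (PySem.List.enumerate lista 0).foldl
            (fun (st : Int × Int) p => if (lista.count p.2 : Int) > st.2 then (p.1, (lista.count p.2 : Int)) else st)
            (0, 0) := by
      rw [henum, List.foldl_map]
      simp only [hinner]
    have hex : ∃ p ∈ PySem.List.enumerate lista 0, (lista.count p.2 : Int) = v := by
      rcases List.mem_iff_getElem.mp hk with ⟨j, hj, hje⟩
      exact ⟨((j : Int), k), (PySem.List.mem_enumerate_iff _ _ _).mpr ⟨j, hj, by simp [hje]⟩, hkv⟩
    have hubp : ∀ p ∈ PySem.List.enumerate lista 0, (lista.count p.2 : Int) ≤ v := by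
      intro p hp
      rcases (PySem.List.mem_enumerate_iff _ _ _).mp hp with ⟨j, hj, rfl⟩
      exact hub _ (List.getElem_mem hj)
    obtain ⟨q, hfind, hfold⟩ := pvFoldChar (fun x => (lista.count x : Int)) v
      (PySem.List.enumerate lista 0) 0 0 hubp hvpos hex
    rw [hA, hfold, hm]
    have hpred : (fun p : Int × Int => counts.getD p.2 0 == v)
        = (fun p : Int × Int => (lista.count p.2 : Int) == v) := by
      funext p; rw [hcget]
    rw [hpred, hfind]
    rfl
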